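-- pv_equiv track=rewrite | github.com/niv-shapira/Rosenberg-2021-Repository-DORA | code/DORA_Utils_Utils.py | NewNodes
-- ===== SOURCE A (Python) =====
-- def NewNodes(da):
--     '''
--     Calculate number of new nodes visited in window
--
--     Parameters:
--     hist_states: Matrix of history
--
--     Returns:
--     list: [empty array, window sizes, new nodes counts]
--     '''
--     newnodes = []
--     sumofnewnodes = []
--     sumofsteps = list(range(len(da)))
--     for s in da:
--         if s not in newnodes:
--             newnodes += [s]
--         sumofnewnodes += [len(newnodes)]
--     return sumofsteps, sumofnewnodes
-- ===== SOURCE B (Python) =====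
-- def NewNodes(da):
--     '''
--     Calculate number of new nodes visited in window (first-occurrence
--     indicator + running prefix sum, instead of a stateful seen-list).
--     '''
--     sumofsteps = list(range(len(da)))
--     indicator = [1 if da.index(s) == i else 0 for i, s in enumerate(da)]
--     sumofnewnodes = []
--     total = 0
--     for x in indicator:
--         total += x
--         sumofnewnodes.append(total)
--     return sumofsteps, sumofnewnodes
-- ===== Notes on version B (the rewrite author's own statement) =====
-- stated objective: alternative
-- what changed: Replaces A's stateful seen-list loop (membership test + append + len) by a first-occurrence indicator computed with da.index(s)==i over enumerate(da), followed by a separate prefix-sum pass.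
import Mathlib
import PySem

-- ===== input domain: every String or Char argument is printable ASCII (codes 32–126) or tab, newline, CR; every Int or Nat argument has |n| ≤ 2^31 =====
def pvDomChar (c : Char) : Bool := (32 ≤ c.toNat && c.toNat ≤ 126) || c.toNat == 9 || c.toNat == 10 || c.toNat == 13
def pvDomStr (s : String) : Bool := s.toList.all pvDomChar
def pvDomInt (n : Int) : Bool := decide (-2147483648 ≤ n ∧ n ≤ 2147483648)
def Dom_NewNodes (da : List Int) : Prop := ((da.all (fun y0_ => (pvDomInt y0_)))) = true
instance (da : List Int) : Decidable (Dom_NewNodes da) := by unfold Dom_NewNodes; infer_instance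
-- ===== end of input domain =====

-- B replaces A's stateful seen-list loop by a first-occurrence indicator (da.index(s) == i)
-- plus a separate prefix-sum pass; same cost, different decomposition (objective: alternative).

-- ===== PORT A =====
def NewNodes (da : List Int) : List Int × List Int :=
  let sumofsteps := PySem.List.pyRange 0 da.length 1
  let r := da.foldl (fun (st : List Int × List Int) s =>
      let newnodes := if s ∈ st.1 then st.1 else st.1 ++ [s]
      (newnodes, st.2 ++ [(newnodes.length : Int)])) (([] : List Int), ([] : List Int))
  (sumofsteps, r.2)

-- ===== PORT B =====
-- running prefix sum of the indicator list (B's 'total' loop)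
def pvPrefixSums : Int → List Int → List Int
  | _, [] => []
  | total, x :: xs => (total + x) :: pvPrefixSums (total + x) xs

def NewNodes_alt (da : List Int) : List Int × List Int :=
  let sumofsteps := PySem.List.pyRange 0 da.length 1
  -- indicator: 1 iff this is the first occurrence (da.index(s) == i); index? is never none here
  let indicator := (PySem.List.enumerate da 0).map
      (fun p => if (PySem.List.index? da p.2).map (fun n => (n : Int)) = some p.1 then (1 : Int) else 0)
  (sumofsteps, pvPrefixSums 0 indicator)

-- ===== PRECONDITION & SPEC =====
def Spec_NewNodes (da : List Int) (out : List Int × List Int) : Prop := out = NewNodes_alt da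
instance (da : List Int) (out : List Int × List Int) : Decidable (Spec_NewNodes da out) := by unfold Spec_NewNodes; infer_instance

-- ===== CLAIM (what is proved, stated in full; the proofs are below) =====
def Claim_equal_NewNodes : Prop := ∀ (da : List Int), Dom_NewNodes da → Spec_NewNodes da (NewNodes da)

-- ===== LEMMAS AND PROOFS =====

-- first-occurrence indicator sequence of `rest`, relative to already-seen prefix `pref`
def pvInds : List Int → List Int → List Int
  | _, [] => []
  | pref, s :: r => (if s ∈ pref then (0 : Int) else 1) :: pvInds (pref ++ [s]) r

theorem pvLoopA_eq : ∀ (rest pref seen sums : List Int),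
    (∀ x, x ∈ seen ↔ x ∈ pref) →
    (rest.foldl (fun (st : List Int × List Int) s =>
      let newnodes := if s ∈ st.1 then st.1 else st.1 ++ [s]
      (newnodes, st.2 ++ [(newnodes.length : Int)])) (seen, sums)).2
    = sums ++ pvPrefixSums (seen.length : Int) (pvInds pref rest) := by
  intro rest
  induction rest with
  | nil => intro pref seen sums _; simp [pvInds, pvPrefixSums]
  | cons s r ih =>
    intro pref seen sums hmem
    simp only [List.foldl_cons]
    by_cases hs : s ∈ seen
    · have hp : s ∈ pref := (hmem s).mp hs
      have hmem' : ∀ x, x ∈ seen ↔ x ∈ pref ++ [s] := by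
        intro x
        simp only [List.mem_append, List.mem_singleton]
        constructor
        · intro h; exact Or.inl ((hmem x).mp h)
        · rintro (h | h)
          · exact (hmem x).mpr h
          · subst h; exact hs
      simp only [if_pos hs]
      rw [ih (pref ++ [s]) seen (sums ++ [(seen.length : Int)]) hmem']
      simp [pvInds, hp, pvPrefixSums, List.append_assoc]
    · have hp : s ∉ pref := fun h => hs ((hmem s).mpr h)
      have hmem' : ∀ x, x ∈ seen ++ [s] ↔ x ∈ pref ++ [s] := by
        intro x
        simp only [List.mem_append, List.mem_singleton]
        exact or_congr (hmem x) Iff.rfl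
      simp only [if_neg hs]
      rw [ih (pref ++ [s]) (seen ++ [s]) (sums ++ [((seen ++ [s]).length : Int)]) hmem']
      simp only [pvInds, if_neg hp, pvPrefixSums, List.length_append, List.length_cons,
        List.length_nil, Nat.cast_add, Nat.cast_one, zero_add, List.append_assoc,
        List.cons_append, List.nil_append]

theorem pvIndex?_first {pref : List Int} {s : Int} (r : List Int) (hp : s ∉ pref) :
    PySem.List.index? (pref ++ s :: r) s = some pref.length := by
  rw [PySem.List.index?_eq_some_iff]
  exact ⟨pref, r, rfl, rfl, hp⟩

theorem pvIndex?_early {pref : List Int} {s : Int} (r : List Int) (hp : s ∈ pref) :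
    ∃ j, PySem.List.index? (pref ++ r) s = some j ∧ j < pref.length := by
  rw [PySem.List.index?_append_of_mem r hp]
  obtain ⟨j, hj⟩ := Option.isSome_iff_exists.mp ((PySem.List.index?_isSome_iff pref s).mpr hp)
  refine ⟨j, hj, ?_⟩
  obtain ⟨pre, suf, heq, hlen, _⟩ := (PySem.List.index?_eq_some_iff pref s j).mp hj
  subst hlen; subst heq
  simp

theorem pvIndicator_eq : ∀ (rest pref : List Int),
    (PySem.List.enumerate rest (pref.length : Int)).map
      (fun p => if (PySem.List.index? (pref ++ rest) p.2).map (fun n => (n : Int)) = some p.1 then (1 : Int) else 0)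
    = pvInds pref rest := by
  intro rest
  induction rest with
  | nil => intro pref; simp [pvInds, PySem.List.enumerate_nil]
  | cons s r ih =>
    intro pref
    rw [PySem.List.enumerate_cons, List.map_cons, pvInds, List.cons.injEq]
    refine ⟨?_, ?_⟩
    · by_cases hp : s ∈ pref
      · obtain ⟨j, hj, hjlt⟩ := pvIndex?_early (s :: r) hp
        simp only [hj]
        rw [if_neg, if_pos hp]
        intro h
        have h2 : (j : Int) = (pref.length : Int) := Option.some.inj h
        omega
      · rw [pvIndex?_first r hp]
        simp [hp]
    · have h2 := ih (pref ++ [s])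
      simp only [List.length_append, List.length_cons, List.length_nil, Nat.cast_add,
        Nat.cast_one, List.append_assoc, List.singleton_append, zero_add] at h2
      exact h2

-- ===== VERDICT (by name: the statement is the Claim_ definition above) =====
theorem NewNodes_spec : Claim_equal_NewNodes := by
  intro da _
  show NewNodes da = NewNodes_alt da
  have hA := pvLoopA_eq da [] [] [] (by simp)
  have hB := pvIndicator_eq da []
  simp only [List.length_nil, Nat.cast_zero, List.nil_append] at hA hB
  unfold NewNodes NewNodes_alt
  exact congrArg (Prod.mk _) (hA.trans (congrArg (pvPrefixSums 0) hB.symm))
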